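-- pv_equiv track=rewrite | github.com/ParkHoH/Algorithm_test | baekjoon/1744_수 묶기.py | check
-- ===== SOURCE A (Python) =====
-- def check(arr):
--     sum = 0
--
--     for i in range(0, len(arr), 2):
--         if i == len(arr)-1:
--             sum += arr[i]
--         else:
--             sum += arr[i] * arr[i+1]
--
--     return sum
-- ===== SOURCE B (Python) =====
-- def check(arr):
--     s = 0
--     pending = None
--     for x in arr:
--         if pending is None:
--             pending = x
--         else:
--             s += pending * x
--             pending = None
--     if pending is not None:
--         s += pending
--     return s
-- ===== Notes on version B (the rewrite author's own statement) =====
-- stated objective: alternative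
-- what changed: Replaced the index loop over range(0,len,2) with its in-loop last-index branch by a single pass over the elements themselves, pairing via a 'pending' state variable and adding the unpaired leftover after the loop.
import Mathlib
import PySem

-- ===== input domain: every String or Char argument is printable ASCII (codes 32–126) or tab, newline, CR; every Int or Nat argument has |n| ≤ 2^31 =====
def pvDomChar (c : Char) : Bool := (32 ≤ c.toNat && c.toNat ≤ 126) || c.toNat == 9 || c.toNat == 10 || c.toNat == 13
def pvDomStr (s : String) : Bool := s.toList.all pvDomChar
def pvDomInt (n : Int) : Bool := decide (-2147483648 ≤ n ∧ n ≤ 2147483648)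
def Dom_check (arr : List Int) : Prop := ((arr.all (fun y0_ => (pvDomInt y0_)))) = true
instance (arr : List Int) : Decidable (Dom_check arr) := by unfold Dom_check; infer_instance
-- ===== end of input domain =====

-- B replaces A's stepped index loop (with its in-loop last-element branch) by structural
-- a single element-wise pass pairing via a 'pending' state; objective: alternative.

-- ===== PORT A =====
-- literal transliteration: sum = 0; for i in range(0, len(arr), 2): if i == len(arr)-1: sum += arr[i] else: sum += arr[i]*arr[i+1]
def check (arr : List Int) : Int :=
  (PySem.List.pyRange 0 (arr.length : Int) 2).foldl
    (fun sum i =>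
      if i = (arr.length : Int) - 1 then
        sum + PySem.List.pyGetD arr i 0
      else
        sum + PySem.List.pyGetD arr i 0 * PySem.List.pyGetD arr (i + 1) 0)
    0

-- ===== PORT B =====
-- B's loop body: state (s, pending); pending = none ↔ Python's 'pending is None'
def checkStep (acc : Int × Option Int) (x : Int) : Int × Option Int :=
  match acc.2 with
  | none => (acc.1, some x)
  | some p => (acc.1 + p * x, none)

-- literal transliteration of Source B: one pass with 'pending', leftover added after the loop
def check_alt (arr : List Int) : Int :=
  let r := arr.foldl checkStep (0, none)
  match r.2 with
  | none => r.1
  | some p => r.1 + p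

-- ===== PRECONDITION & SPEC =====
def Spec_check (arr : List Int) (out : Int) : Prop := out = check_alt arr
instance (arr : List Int) (out : Int) : Decidable (Spec_check arr out) := by unfold Spec_check; infer_instance

-- ===== CLAIM (what is proved, stated in full; the proofs are below) =====
def Claim_equal_check : Prop := ∀ (arr : List Int), Dom_check arr → Spec_check arr (check arr)

-- ===== LEMMAS AND PROOFS =====

-- proof-side spec: pairwise product sum, two elements at a time
def pairSum : List Int → Int
  | a :: b :: t => a * b + pairSum t
  | rest => rest.sum

-- A's loop body as a pure summand
def gA (arr : List Int) (i : Int) : Int :=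
  if i = (arr.length : Int) - 1 then PySem.List.pyGetD arr i 0
  else PySem.List.pyGetD arr i 0 * PySem.List.pyGetD arr (i + 1) 0

lemma foldl_gA (arr : List Int) (l : List Int) (s : Int) :
    l.foldl
      (fun sum i =>
        if i = (arr.length : Int) - 1 then
          sum + PySem.List.pyGetD arr i 0
        else
          sum + PySem.List.pyGetD arr i 0 * PySem.List.pyGetD arr (i + 1) 0)
      s = s + (l.map (gA arr)).sum := by
  induction l generalizing s with
  | nil => simp
  | cons x xs ih =>
    simp only [List.foldl_cons, List.map_cons, List.sum_cons, ih, gA]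
    split_ifs <;> ring

lemma pyRange2_eq (n : Nat) :
    PySem.List.pyRange 0 (n : Int) 2 =
      (List.range ((n + 1) / 2)).map (fun k : Nat => 2 * (k : Int)) := by
  rw [PySem.List.pyRange_of_pos 0 (n : Int) (by norm_num)]
  have hcount : (if (0 : Int) < (n : Int) then (((n : Int) - 0 + 2 - 1) / 2).toNat else 0)
      = (n + 1) / 2 := by
    split_ifs with h
    · have : ((n : Int) - 0 + 2 - 1) = ((n + 1 : Nat) : Int) := by push_cast; ring
      rw [this]
      rw [show ((2 : Int)) = ((2 : Nat) : Int) from rfl, ← Int.natCast_div, Int.toNat_natCast]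
    · have hn : n = 0 := by omega
      simp [hn]
  rw [hcount]
  exact List.map_congr_left (fun k _ => by ring)

lemma gA_cons_cons_shift (a b : Int) (t : List Int) (k : Nat) :
    gA (a :: b :: t) (2 * (k + 1) : Nat) = gA t (2 * k : Nat) := by
  unfold gA
  have hidx : ((2 * (k + 1) : Nat) : Int) = ((2 * k : Nat) : Int) + 2 := by push_cast; ring
  have hcond : (((2 * (k + 1) : Nat) : Int) = ((a :: b :: t).length : Int) - 1)
      ↔ (((2 * k : Nat) : Int) = (t.length : Int) - 1) := by
    simp only [List.length_cons]
    push_cast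
    omega
  have h1 : PySem.List.pyGetD (a :: b :: t) ((2 * (k + 1) : Nat) : Int) 0
      = PySem.List.pyGetD t ((2 * k : Nat) : Int) 0 := by
    rw [show ((2 * (k + 1) : Nat) : Int) = (((2 * k + 2 : Nat)) : Int) by push_cast; ring]
    rw [PySem.List.pyGetD_natCast, PySem.List.pyGetD_natCast]
    simp [List.getD]
  have h2 : PySem.List.pyGetD (a :: b :: t) (((2 * (k + 1) : Nat) : Int) + 1) 0
      = PySem.List.pyGetD t (((2 * k : Nat) : Int) + 1) 0 := by
    rw [show (((2 * (k + 1) : Nat) : Int) + 1) = (((2 * k + 3 : Nat)) : Int) by push_cast; ring]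
    rw [show (((2 * k : Nat) : Int) + 1) = (((2 * k + 1 : Nat)) : Int) by push_cast; ring]
    rw [PySem.List.pyGetD_natCast, PySem.List.pyGetD_natCast]
    simp [List.getD]
  split_ifs with hA hB hB
  · exact h1
  · exact absurd (hcond.mp hA) hB
  · exact absurd (hcond.mpr hB) hA
  · rw [h1, h2]

lemma check_eq_sum (arr : List Int) :
    check arr = ((List.range ((arr.length + 1) / 2)).map (fun k : Nat => gA arr ((2 * k : Nat) : Int))).sum := by
  unfold check
  rw [foldl_gA, pyRange2_eq, List.map_map]
  rw [Int.zero_add]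
  exact congrArg _ (List.map_congr_left (fun k _ => by simp only [Function.comp]; norm_num))

lemma foldl_checkStep_add (l : List Int) : ∀ (s : Int) (p : Option Int),
    l.foldl checkStep (s, p) =
      (s + (l.foldl checkStep (0, p)).1, (l.foldl checkStep (0, p)).2) := by
  induction l with
  | nil => intro s p; simp
  | cons x xs ih =>
    intro s p
    cases p with
    | none =>
      simp only [List.foldl_cons, checkStep]
      rw [ih s (some x)]
    | some q =>
      simp only [List.foldl_cons, checkStep]
      rw [ih (s + q * x) none, ih (0 + q * x) none]
      simp
      ring

lemma check_alt_cons2 (a b : Int) (t : List Int) :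
    check_alt (a :: b :: t) = a * b + check_alt t := by
  unfold check_alt
  simp only [List.foldl_cons, checkStep]
  rw [foldl_checkStep_add t (0 + a * b) none]
  rcases h : (t.foldl checkStep (0, none)).2 with _ | p
  · simp
  · simp; ring

lemma check_alt_eq_pairSum (arr : List Int) : check_alt arr = pairSum arr := by
  induction arr using pairSum.induct with
  | case1 a b t ih => rw [check_alt_cons2, ih, pairSum]
  | case2 rest h =>
    rcases rest with _ | ⟨x, _ | ⟨y, t⟩⟩
    · rfl
    · simp [check_alt, checkStep, pairSum]
    · exact absurd rfl (fun hh => h x y t hh)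

theorem check_eq_pairSum (arr : List Int) : check arr = pairSum arr := by
  induction arr using pairSum.induct with
  | case1 a b t ih =>
    rw [check_eq_sum] at *
    have hlen : ((a :: b :: t).length + 1) / 2 = (t.length + 1) / 2 + 1 := by
      simp only [List.length_cons]; omega
    rw [hlen, List.range_succ_eq_map, List.map_cons, List.map_map, List.sum_cons]
    have h0 : gA (a :: b :: t) ((2 * 0 : Nat) : Int) = a * b := by
      unfold gA
      simp only [List.length_cons]
      rw [if_neg (by push_cast; omega)]
      rw [show ((2 * 0 : Nat) : Int) = ((0 : Nat) : Int) by norm_num]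
      rw [PySem.List.pyGetD_natCast, show (((0 : Nat) : Int) + 1) = ((1 : Nat) : Int) by norm_num,
        PySem.List.pyGetD_natCast]
      simp [List.getD]
    have hshift : (List.map ((fun k => gA (a :: b :: t) ((2 * k : Nat) : Int)) ∘ Nat.succ)
        (List.range ((t.length + 1) / 2)))
        = List.map (fun k => gA t ((2 * k : Nat) : Int)) (List.range ((t.length + 1) / 2)) := by
      apply List.map_congr_left
      intro k _
      simp only [Function.comp]
      exact gA_cons_cons_shift a b t k
    rw [h0, hshift, pairSum]
    omega
  | case2 rest h =>
    rcases rest with _ | ⟨x, _ | ⟨y, t⟩⟩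
    · rw [check_eq_sum]; simp [pairSum]
    · rw [check_eq_sum]
      have h1 : ((([x] : List Int).length + 1) / 2) = 1 := by simp
      rw [h1]
      simp only [List.range_one, List.map_cons, List.map_nil, List.sum_cons, List.sum_nil]
      unfold gA
      rw [show ((2 * 0 : Nat) : Int) = ((0 : Nat) : Int) by norm_num, PySem.List.pyGetD_natCast]
      simp [List.getD, pairSum]
    · exact absurd rfl (fun hh => h x y t hh)

-- ===== VERDICT (by name: the statement is the Claim_ definition above) =====
theorem check_spec : Claim_equal_check := by
  intro arr _
  unfold Spec_check
  rw [check_eq_pairSum, check_alt_eq_pairSum]
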